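-- pv_equiv track=rewrite | github.com/gn2019/PBM_analysis_suite | seed_and_wobble_modules.py | gapped_convert_to_letters
-- ===== SOURCE A (Python) =====
-- def gapped_convert_to_letters(number, k, seed, seedwidth):
--     """
--     Very similar to convert to letters, but also takes a gapped pattern
--     to generate the corresponding word
--
--     seed: gapped pattern represented as a bit string
--     seedwidth: width of gapped pattern
--     """
--     letters = "ACGT"
--     string = ""
--     seed_position_holder = 0
--
--     for i in range((k - 1) * 2, -1, -2):
--         while not (1 << seed_position_holder) & seed:
--             string += "."
--             seed_position_holder += 1
--
--         string += letters[(number >> i) & 0x3]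
--         seed_position_holder += 1
--
--     return string
-- ===== SOURCE B (Python) =====
-- def gapped_convert_to_letters(number, k, seed, seedwidth):
--     """Two-pass rewrite: first collect the k set-bit positions of seed
--     (the letter slots), then fill a '.'-buffer of the right span with the
--     letters decoded from number, and join."""
--     letters = "ACGT"
--     positions = []
--     p = 0
--     while len(positions) < k:
--         if (seed >> p) & 1:
--             positions.append(p)
--         p += 1
--     if not positions:
--         return ""
--     out = ["."] * (positions[-1] + 1)
--     for j, p in enumerate(positions):
--         out[p] = letters[(number >> ((k - 1 - j) * 2)) & 3]
--     return "".join(out)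
-- ===== Notes on version B (the rewrite author's own statement) =====
-- stated objective: alternative
-- what changed: A interleaves an inner gap-burning while-loop inside the letter loop, testing one seed bit at a time while building the string left to right; B first collects the k set-bit positions of seed in one scan, then allocates a '.'-filled buffer of the exact span and writes each decoded letter into its slot.
import Mathlib
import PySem

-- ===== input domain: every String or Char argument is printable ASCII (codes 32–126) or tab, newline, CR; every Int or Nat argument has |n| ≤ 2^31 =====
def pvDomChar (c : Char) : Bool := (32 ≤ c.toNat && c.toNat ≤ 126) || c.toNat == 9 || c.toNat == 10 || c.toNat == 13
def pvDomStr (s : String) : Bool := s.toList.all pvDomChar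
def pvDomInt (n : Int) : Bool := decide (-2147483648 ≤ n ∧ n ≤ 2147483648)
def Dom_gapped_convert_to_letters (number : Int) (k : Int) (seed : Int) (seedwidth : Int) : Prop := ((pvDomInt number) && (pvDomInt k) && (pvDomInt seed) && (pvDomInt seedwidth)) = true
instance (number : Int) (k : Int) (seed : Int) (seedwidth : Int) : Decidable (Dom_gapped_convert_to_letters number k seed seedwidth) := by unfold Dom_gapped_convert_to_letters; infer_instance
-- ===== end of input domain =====

-- B rebuilds the word in two passes (collect the k set-bit positions of seed, then fill a '.'-buffer
-- with the decoded letters) instead of A's nested letter-loop with inner gap-burning; objective: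
-- alternative decomposition, similar cost.

-- ===== PORT A =====
-- the inner "while not (1 << seed_position_holder) & seed: string += '.'; holder += 1" loop;
-- the fuel of 64 only makes the recursion total — on every input admitted by Pre_ (inside the
-- stated domain) the next set bit is reached before the fuel runs out.
def pvBurnA (seed : Int) (fuel : Nat) (s : List Char) (h : Nat) : List Char × Nat :=
  match fuel with
  | 0 => (s, h)
  | f + 1 =>
    if PySem.Int.band ((1 : Int) <<< h) seed = 0 then
      pvBurnA seed f (s ++ ['.']) (h + 1)
    else (s, h)

def gapped_convert_to_letters (number : Int) (k : Int) (seed : Int) (seedwidth : Int) : String :=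
  let letters : String := "ACGT"
  -- for i in range((k - 1) * 2, -1, -2): every i in this range is ≥ 0, so
  -- 'number >> i' is Int.shiftRight by i.toNat (exact); the index (number >> i) & 3
  -- is always in 0..3, so letters[...] (pyGet?) is always some and getD is exact
  let st := (PySem.List.pyRange ((k - 1) * 2) (-1) (-2)).foldl
    (fun (st : List Char × Nat) i =>
      let b := pvBurnA seed 64 st.1 st.2
      (b.1 ++ [(PySem.Str.pyGet? letters (PySem.Int.band (Int.shiftRight number i.toNat) 3)).getD '?'], b.2 + 1))
    ([], 0)
  String.ofList st.1

-- ===== PORT B =====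
-- "while len(positions) < k: if (seed >> p) & 1: positions.append(p); p += 1";
-- the fuel of k.toNat + 64 only makes the recursion total — on every input admitted by Pre_
-- (inside the stated domain) the loop exits before the fuel runs out.
def pvPositionsB (seed : Int) (k : Int) (fuel : Nat) (p : Nat) (acc : List Nat) : List Nat :=
  match fuel with
  | 0 => acc
  | f + 1 =>
    if (acc.length : Int) < k then
      pvPositionsB seed k f (p + 1)
        (if PySem.Int.band (Int.shiftRight seed p) 1 ≠ 0 then acc ++ [p] else acc)
    else acc

def gapped_convert_to_letters_alt (number : Int) (k : Int) (seed : Int) (seedwidth : Int) : String :=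
  let letters : String := "ACGT"
  let positions := pvPositionsB seed k (k.toNat + 64) 0 []
  if positions = [] then "" else
    let out0 := List.replicate (positions.getLast! + 1) '.'
    -- for j, p in enumerate(positions): out[p] = letters[(number >> ((k-1-j)*2)) & 3]
    -- (zipIdx pairs are (p, j); the shift amount (k-1-j)*2 is ≥ 0 for every j < len(positions))
    let out := (positions.zipIdx 0).foldl
      (fun (out : List Char) pj =>
        out.set pj.1
          ((PySem.Str.pyGet? letters
            (PySem.Int.band (Int.shiftRight number ((k - 1 - (pj.2 : Int)) * 2).toNat) 3)).getD '?'))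
      out0
    String.ofList out

-- ===== PRECONDITION & SPEC =====
-- Pre_ excludes exactly the inputs on which Python A DIVERGES (the inner while loop scans for a
-- set bit forever): k > 0 with a non-negative seed that has fewer than k set bits in total.
-- Every set bit of a non-negative seed lies below seed.toNat.size, so the count below is the
-- full popcount of seed — no size cap.
def Pre_gapped_convert_to_letters (number : Int) (k : Int) (seed : Int) (seedwidth : Int) : Prop :=
  k ≤ 0 ∨ seed < 0 ∨ k ≤ (((Finset.range seed.toNat.size).filter (fun q => seed.testBit q = true)).card : Int)
instance (number : Int) (k : Int) (seed : Int) (seedwidth : Int) : Decidable (Pre_gapped_convert_to_letters number k seed seedwidth) := by unfold Pre_gapped_convert_to_letters; infer_instance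

def pvWitness_gapped_convert_to_letters : Int × Int × Int × Int := (27, 3, 11, 4)

def Spec_gapped_convert_to_letters (number : Int) (k : Int) (seed : Int) (seedwidth : Int) (out : String) : Prop := out = gapped_convert_to_letters_alt number k seed seedwidth
instance (number : Int) (k : Int) (seed : Int) (seedwidth : Int) (out : String) : Decidable (Spec_gapped_convert_to_letters number k seed seedwidth out) := by unfold Spec_gapped_convert_to_letters; infer_instance

-- ===== CLAIM (what is proved, stated in full; the proofs are below) =====
def Claim_equal_gapped_convert_to_letters : Prop := ∀ (number : Int) (k : Int) (seed : Int) (seedwidth : Int), Dom_gapped_convert_to_letters number k seed seedwidth → Pre_gapped_convert_to_letters number k seed seedwidth → Spec_gapped_convert_to_letters number k seed seedwidth (gapped_convert_to_letters number k seed seedwidth)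

-- ===== LEMMAS AND PROOFS =====

-- inside the domain, the full popcount (bits below size) equals the count over bits 0..31
theorem pvSizeFilter (seed : Int) (hnn : 0 ≤ seed) (hub : seed ≤ 2147483648) :
    (Finset.range seed.toNat.size).filter (fun q => seed.testBit q = true)
      = (Finset.range 32).filter (fun q => seed.testBit q = true) := by
  obtain ⟨m, rfl⟩ := Int.eq_ofNat_of_zero_le hnn
  have hm : m < 2 ^ 32 := by
    have : (m : Int) ≤ 2147483648 := hub
    have : m ≤ 2147483648 := by exact_mod_cast this
    omega
  have hsz : m.size ≤ 32 := Nat.size_le.mpr hm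
  ext q
  simp only [Int.toNat_natCast]
  simp only [Finset.mem_filter, Finset.mem_range]
  constructor
  · rintro ⟨hq, hb⟩
    exact ⟨by omega, hb⟩
  · rintro ⟨_, hb⟩
    refine ⟨?_, hb⟩
    have hb' : m.testBit q = true := by simpa [Int.testBit] using hb
    by_contra hge
    have : m < 2 ^ q := by
      have := Nat.lt_size (m := q) (n := m)
      omega
    simp [Nat.testBit_lt_two_pow this] at hb'

-- the letter written for the j-th set position
def pvL (number k : Int) (j : Nat) : Char :=
  (PySem.Str.pyGet? "ACGT" (PySem.Int.band (Int.shiftRight number ((k - 1 - (j : Int)) * 2).toNat) 3)).getD '?'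

-- the dots/letters segment string for positions ps, letter index starting at j, scan start h
def pvSeg (number k : Int) : List Nat → Nat → Nat → List Char
  | [], _, _ => []
  | p :: ps, j, h => List.replicate (p - h) '.' ++ pvL number k j :: pvSeg number k ps (j + 1) (p + 1)

-- where the scan ends after consuming ps from h
def pvEnd : List Nat → Nat → Nat
  | [], h => h
  | p :: ps, _ => pvEnd ps (p + 1)

-- the chain of successive least set-bit positions of seed from h, n of them
inductive pvChain (seed : Int) : Nat → Nat → List Nat → Prop
  | nil (h : Nat) : pvChain seed h 0 []
  | cons (h p n : Nat) (ps : List Nat) (hle : h ≤ p) (hbit : seed.testBit p = true)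
      (hmin : ∀ q, h ≤ q → q < p → seed.testBit q = false)
      (hsmall : p ≤ 31 ∨ p = h) (htail : pvChain seed (p + 1) n ps) :
      pvChain seed h (n + 1) (p :: ps)

-- A's bit test '(1 << h) & seed == 0' is ¬ testBit
theorem pvTestA (seed : Int) (h : Nat) :
    (PySem.Int.band ((1 : Int) <<< h) seed = 0) ↔ seed.testBit h = false := by
  have h1 : ((1 : Int) <<< h) = ((2 ^ h : Nat) : Int) := by
    rw [show ((1:Int) <<< h) = Int.ofNat (1 <<< h) from rfl]
    norm_num [Nat.shiftLeft_eq]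
  rw [h1]
  cases seed with
  | ofNat m =>
    rw [show Int.ofNat m = ((m : Nat) : Int) from rfl,
      PySem.Int.band_of_nonneg (Int.natCast_nonneg _) (Int.natCast_nonneg _)]
    rw [show (((2 ^ h : Nat) : Int).toNat &&& ((m : Nat) : Int).toNat) = (2 ^ h &&& m) from rfl]
    rw [Nat.two_pow_and]
    simp [Int.testBit, Bool.toNat_eq_zero]
  | negSucc m =>
    have hneg : ¬ (0:Int) ≤ Int.negSucc m := by simp [Int.negSucc_not_nonneg]
    rw [show PySem.Int.band ((2 ^ h : Nat) : Int) (Int.negSucc m)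
        = (((2 ^ h : Nat) - (2 ^ h &&& m) : Nat) : Int) by
      simp only [PySem.Int.band, if_neg hneg, if_pos (Int.natCast_nonneg _)]
      rw [show (-Int.negSucc m - 1).toNat = m by simp [Int.negSucc_eq]]
      norm_cast]
    rw [Nat.two_pow_and]
    have hpos : 0 < 2 ^ h := Nat.two_pow_pos h
    simp [Int.testBit]
    rcases Bool.eq_false_or_eq_true (m.testBit h) with hb | hb <;> simp [hb] <;> omega

-- B's bit test '(seed >> h) & 1 != 0' is testBit
theorem pvTestB (seed : Int) (h : Nat) :
    (PySem.Int.band (Int.shiftRight seed h) 1 ≠ 0) ↔ seed.testBit h = true := by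
  cases seed with
  | ofNat m =>
    rw [show Int.shiftRight (Int.ofNat m) h = ((m >>> h : Nat) : Int) from rfl,
      PySem.Int.band_of_nonneg (Int.natCast_nonneg _) (by norm_num)]
    rw [show (((m >>> h : Nat) : Int).toNat &&& (1:Int).toNat) = (m >>> h) &&& 1 from rfl]
    simp [Int.testBit, Nat.testBit, Nat.and_comm, Nat.shiftRight_eq_div_pow]
    norm_cast
  | negSucc m =>
    rw [show Int.shiftRight (Int.negSucc m) h = Int.negSucc (m >>> h) from rfl]
    have hb : PySem.Int.band (Int.negSucc (m >>> h)) 1 = ((1 - (1 &&& (m >>> h)) : Nat) : Int) := by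
      have hneg : ¬ (0:Int) ≤ Int.negSucc (m >>> h) := by
        simp [Int.negSucc_not_nonneg]
      simp only [PySem.Int.band, if_neg hneg, if_pos (by norm_num : (0:Int) ≤ 1)]
      rw [show (-Int.negSucc (m >>> h) - 1).toNat = m >>> h by
        simp only [Int.negSucc_eq]
        omega]
      norm_num [Nat.and_comm]
    rw [hb]
    simp [Int.testBit, Nat.testBit, Nat.and_comm]
    omega

theorem pvChain_end_ge (seed : Int) (n h : Nat) (ps : List Nat) (hc : pvChain seed h n ps) :
    h ≤ pvEnd ps h := by
  induction hc with
  | nil => simp [pvEnd]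
  | cons h p m ps hle hbit hmin hsmall htail ih => show h ≤ pvEnd ps (p + 1); omega

theorem pvChain_mem_ge (seed : Int) (n h : Nat) (ps : List Nat) (hc : pvChain seed h n ps) :
    ∀ q ∈ ps, h ≤ q := by
  induction hc with
  | nil => simp
  | cons h p m ps hle hbit hmin hsmall htail ih =>
    intro q hq
    rcases List.mem_cons.mp hq with rfl | hq
    · exact hle
    · have := ih q hq; omega

theorem pvEnd_le (seed : Int) (n h : Nat) (ps : List Nat) (hc : pvChain seed h n ps) :
    pvEnd ps h ≤ max h 32 + n := by
  induction hc with
  | nil => simp [pvEnd]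
  | cons h p m ps hle hbit hmin hsmall htail ih =>
    show pvEnd ps (p + 1) ≤ _
    omega

theorem pvEnd_getLast (ps : List Nat) (hne : ps ≠ []) : ∀ h, pvEnd ps h = ps.getLast! + 1 := by
  induction ps with
  | nil => simp at hne
  | cons p ps ih =>
    intro h
    cases ps with
    | nil => simp [pvEnd, List.getLast!]
    | cons q qs =>
      show pvEnd (q :: qs) (p+1) = _
      rw [ih (by simp) (p+1)]
      rfl

-- within the 2^31 domain every bit ≥ 31 of a negative seed is set
theorem pvNegBit (seed : Int) (hneg : seed < 0) (hlo : -2147483648 ≤ seed) (q : Nat)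
    (hq : 31 ≤ q) : seed.testBit q = true := by
  cases seed with
  | ofNat m =>
    exact absurd hneg (by rw [show Int.ofNat m = (m : Int) from rfl]; exact not_lt.mpr (Int.natCast_nonneg m))
  | negSucc m =>
    have hm : m < 2 ^ q := by
      have : (m : Int) ≤ 2 ^ 31 - 1 := by
        rw [Int.negSucc_eq] at hlo
        omega
      have hm31 : m < 2 ^ 31 := by exact_mod_cast (by omega : (m : Int) < 2 ^ 31)
      calc m < 2 ^ 31 := hm31
        _ ≤ 2 ^ q := Nat.pow_le_pow_right (by norm_num) hq
    simp [Int.testBit, Nat.testBit_lt_two_pow hm]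

theorem pvChain_exists (seed : Int) (hlo : -2147483648 ≤ seed)
    (n : Nat) : ∀ (h : Nat),
    (seed < 0 ∨ n ≤ ((Finset.range 32).filter (fun q => h ≤ q ∧ seed.testBit q = true)).card) →
    ∃ ps, pvChain seed h n ps := by
  induction n with
  | zero => intro h _; exact ⟨[], pvChain.nil h⟩
  | succ n ih =>
    intro h hav
    have hex : ∃ q, h ≤ q ∧ seed.testBit q = true := by
      rcases hav with hneg | hcard
      · exact ⟨max h 31, le_max_left _ _, pvNegBit seed hneg hlo _ (le_max_right _ _)⟩
      · have hpos : 0 < ((Finset.range 32).filter (fun q => h ≤ q ∧ seed.testBit q = true)).card := by omega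
        obtain ⟨q, hq⟩ := Finset.card_pos.mp hpos
        simp only [Finset.mem_filter, Finset.mem_range] at hq
        exact ⟨q, hq.2.1, hq.2.2⟩
    let p := Nat.find hex
    have hspec := Nat.find_spec hex
    have hminp : ∀ q, h ≤ q → q < p → seed.testBit q = false := by
      intro q h1 h2
      have hmin' := Nat.find_min hex h2
      simp only [not_and, Bool.not_eq_true] at hmin'
      exact hmin' h1
    have hsmall : p ≤ 31 ∨ p = h := by
      rcases hav with hneg | hcard
      · by_cases hcase : h ≤ 31
        · left
          exact Nat.find_le ⟨hcase, pvNegBit seed hneg hlo 31 le_rfl⟩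
        · right
          have hh : seed.testBit h = true := pvNegBit seed hneg hlo h (by omega)
          have : p ≤ h := Nat.find_le ⟨le_rfl, hh⟩
          omega
      · left
        have hpos : 0 < ((Finset.range 32).filter (fun q => h ≤ q ∧ seed.testBit q = true)).card := by omega
        obtain ⟨q, hq⟩ := Finset.card_pos.mp hpos
        simp only [Finset.mem_filter, Finset.mem_range] at hq
        have : p ≤ q := Nat.find_le ⟨hq.2.1, hq.2.2⟩
        omega
    have htailav : seed < 0 ∨ n ≤ ((Finset.range 32).filter (fun q => p + 1 ≤ q ∧ seed.testBit q = true)).card := by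
      rcases hav with hneg | hcard
      · exact Or.inl hneg
      · right
        set S := (Finset.range 32).filter (fun q => h ≤ q ∧ seed.testBit q = true) with hS
        set T := (Finset.range 32).filter (fun q => p + 1 ≤ q ∧ seed.testBit q = true) with hT
        have hsub : S ⊆ T ∪ {p} := by
          intro q hq
          simp only [hS, Finset.mem_filter, Finset.mem_range] at hq
          rcases Nat.lt_or_ge q (p+1) with hlt | hge
          · have : q = p := by
              rcases Nat.lt_or_ge q p with hlt2 | hge2
              · exact absurd hq.2.2 (by simp [hminp q hq.2.1 hlt2])
              · omega
            simp [this]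
          · simp only [Finset.mem_union, hT, Finset.mem_filter, Finset.mem_range]
            exact Or.inl ⟨hq.1, hge, hq.2.2⟩
        have h1 := Finset.card_le_card hsub
        have h2 := Finset.card_union_le T {p}
        rw [Finset.card_singleton] at h2
        omega
    obtain ⟨ps, hps⟩ := ih (p + 1) htailav
    exact ⟨p :: ps, pvChain.cons h p n ps hspec.1 hspec.2 hminp hsmall hps⟩

-- the burn loop reaches the next chained position, emitting its dots
theorem pvBurnA_aux (seed : Int) (p : Nat) (hbit : seed.testBit p = true) :
    ∀ (f h : Nat) (s : List Char), h ≤ p → p < h + f →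
    (∀ q, h ≤ q → q < p → seed.testBit q = false) →
    pvBurnA seed f s h = (s ++ List.replicate (p - h) '.', p) := by
  intro f
  induction f with
  | zero => intro h s h1 h2 _; omega
  | succ f ih =>
    intro h s h1 h2 hmin
    rcases Nat.eq_or_lt_of_le h1 with rfl | hlt
    · rw [pvBurnA, if_neg (by rw [pvTestA]; simp [hbit])]
      simp
    · rw [pvBurnA, if_pos (by rw [pvTestA]; exact hmin h le_rfl hlt)]
      rw [ih (h+1) (s ++ ['.']) hlt (by omega) (fun q hq1 hq2 => hmin q (by omega) hq2)]
      rw [List.append_assoc]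
      congr 2
      have : p - h = (p - (h+1)) + 1 := by omega
      rw [this, List.replicate_succ]
      rfl

-- A's outer fold produces the segment string
theorem pvFoldA_eq (number k seed : Int) (n : Nat) : ∀ (j0 h : Nat) (s : List Char) (ps : List Nat),
    pvChain seed h n ps →
    ((List.range' j0 n).map (fun (j : Nat) => (k - 1) * 2 - 2 * (j : Int))).foldl
      (fun (st : List Char × Nat) i =>
        let b := pvBurnA seed 64 st.1 st.2
        (b.1 ++ [(PySem.Str.pyGet? "ACGT" (PySem.Int.band (Int.shiftRight number i.toNat) 3)).getD '?'], b.2 + 1))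
      (s, h)
      = (s ++ pvSeg number k ps j0 h, pvEnd ps h) := by
  induction n with
  | zero =>
    intro j0 h s ps hc
    cases hc
    simp [pvSeg, pvEnd]
  | succ n ih =>
    intro j0 h s ps hc
    cases hc with
    | cons _ p _ ps hle hbit hmin hsmall htail =>
      rw [List.range'_succ, List.map_cons, List.foldl_cons]
      simp only
      rw [pvBurnA_aux seed p hbit 64 h s hle (by omega) hmin]
      have hL : (PySem.Str.pyGet? "ACGT"
          (PySem.Int.band (Int.shiftRight number ((k - 1) * 2 - 2 * (j0 : Int)).toNat) 3)).getD '?'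
          = pvL number k j0 := by
        unfold pvL
        rw [show ((k - 1) * 2 - 2 * (j0:Int)) = ((k - 1 - (j0:Int)) * 2) by ring]
      rw [hL, ih (j0 + 1) (p + 1) _ ps htail]
      simp [pvSeg, pvEnd, List.append_assoc]

theorem pvChain_shift (seed : Int) (h n p : Nat) (ps : List Nat)
    (hc : pvChain seed h n (p :: ps)) (hne : h ≠ p) : pvChain seed (h + 1) n (p :: ps) := by
  cases hc with
  | cons _ _ m _ hle hbit hmin hsmall htail =>
    exact pvChain.cons _ _ _ _ (by omega) hbit (fun q h1 h2 => hmin q (by omega) h2)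
      (by omega) htail

-- B's collection loop returns exactly the chained positions
theorem pvPositionsB_eq (seed k : Int) (hk : 0 < k) : ∀ (fuel : Nat) (n h : Nat) (acc ps : List Nat),
    pvChain seed h n ps →
    acc.length + n = k.toNat → pvEnd ps h ≤ h + fuel →
    pvPositionsB seed k fuel h acc = acc ++ ps := by
  intro fuel
  induction fuel with
  | zero =>
    intro n h acc ps hc hlen hfu
    cases hc with
    | nil => simp [pvPositionsB]
    | cons _ p m ps hle hbit hmin hsmall htail =>
      exfalso
      have h1 := pvChain_end_ge seed m (p+1) ps htail
      have h2 : pvEnd (p :: ps) h = pvEnd ps (p+1) := rfl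
      omega
  | succ f ih =>
    intro n h acc ps hc hlen hfu
    cases hc with
    | nil =>
      rw [pvPositionsB, if_neg (by omega), List.append_nil]
    | cons _ p m ps hle hbit hmin hsmall htail =>
      have hcond : (acc.length : Int) < k := by omega
      rw [pvPositionsB, if_pos hcond]
      have hend : pvEnd (p :: ps) h = pvEnd ps (p+1) := rfl
      rcases Nat.eq_or_lt_of_le hle with heq | hlt
      · subst heq
        rw [if_pos (by rw [pvTestB]; exact hbit)]
        rw [ih m (h+1) (acc ++ [h]) ps htail (by simp; omega)
          (by have := pvChain_end_ge seed m (h+1) ps htail; omega)]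
        simp
      · have hb0 : ¬ (PySem.Int.band (Int.shiftRight seed h) 1 ≠ 0) := by
          rw [pvTestB]
          simp [hmin h le_rfl hlt]
        rw [if_neg hb0]
        have hend2 : pvEnd (p :: ps) (h+1) = pvEnd ps (p+1) := rfl
        exact ih (m+1) (h+1) acc (p :: ps)
          (pvChain_shift seed h (m+1) p ps (pvChain.cons h p m ps hle hbit hmin hsmall htail) (by omega))
          hlen (by omega)

theorem pvSetRepl (x : Char) : ∀ m : Nat, (List.replicate (m+1) '.').set m x = List.replicate m '.' ++ [x] := by
  intro m
  induction m with
  | zero => rfl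
  | succ m ih =>
    rw [List.replicate_succ, List.replicate_succ, List.set_cons_succ,
      show ('.' :: List.replicate m '.') = List.replicate (m+1) '.' from rfl, ih]
    rfl

theorem pvFoldlSetShift (P : List Char) (g : Nat × Nat → Nat) (L' : Nat × Nat → Char) :
    ∀ (l : List (Nat × Nat)) (buf : List Char), (∀ x ∈ l, P.length ≤ g x) →
    l.foldl (fun out x => out.set (g x) (L' x)) (P ++ buf)
      = P ++ l.foldl (fun out x => out.set (g x - P.length) (L' x)) buf := by
  intro l
  induction l with
  | nil => intro buf _; rfl
  | cons x l ih =>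
    intro buf hb
    rw [List.foldl_cons, List.foldl_cons]
    rw [show (P ++ buf).set (g x) (L' x) = P ++ buf.set (g x - P.length) (L' x) by
      rw [List.set_append, if_neg (by have := hb x (by simp); omega)]]
    exact ih _ (fun y hy => hb y (by simp [hy]))

-- B's buffer fill produces the segment string
theorem pvFill_eq (number k seed : Int) (n : Nat) : ∀ (j0 h : Nat) (ps : List Nat),
    pvChain seed h n ps → ps ≠ [] →
    (ps.zipIdx j0).foldl
      (fun (out : List Char) pj => out.set (pj.1 - h) (pvL number k pj.2))
      (List.replicate (pvEnd ps h - h) '.')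
      = pvSeg number k ps j0 h := by
  induction n with
  | zero => intro j0 h ps hc hne; cases hc; simp at hne
  | succ n ih =>
    intro j0 h ps hc hne
    cases hc with
    | cons _ p _ ps hle hbit hmin hsmall htail =>
      rw [List.zipIdx_cons, List.foldl_cons]
      by_cases hps : ps = []
      · subst hps
        cases htail
        show List.foldl _ ((List.replicate (pvEnd [] (p+1) - h) '.').set (p - h) (pvL number k j0)) _ = _
        rw [show pvEnd [] (p+1) - h = (p - h) + 1 by simp [pvEnd]; omega]
        rw [pvSetRepl]
        simp [pvSeg]
      · have hge := pvChain_end_ge seed n (p+1) ps htail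
        have hmem := pvChain_mem_ge seed n (p+1) ps htail
        rw [show List.replicate (pvEnd (p :: ps) h - h) '.'
            = List.replicate ((p - h) + 1) '.' ++ List.replicate (pvEnd ps (p+1) - (p+1)) '.' by
          rw [← List.replicate_add]
          congr 1
          show pvEnd ps (p+1) - h = _
          omega]
        show List.foldl _ ((List.replicate ((p-h)+1) '.' ++ _).set (p - h) (pvL number k j0)) _ = _
        rw [List.set_append, if_pos (by simp), pvSetRepl]
        rw [pvFoldlSetShift (List.replicate (p-h) '.' ++ [pvL number k j0])
          (fun pj => pj.1 - h) (fun pj => pvL number k pj.2) _ _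
          (by
            intro x hx
            have hx1 : x.1 ∈ ps := List.fst_mem_of_mem_zipIdx hx
            have := hmem x.1 hx1
            simp
            omega)]
        have hinner : (ps.zipIdx (j0+1)).foldl
            (fun (out : List Char) x => out.set (x.1 - h - (List.replicate (p-h) '.' ++ [pvL number k j0]).length) (pvL number k x.2))
            (List.replicate (pvEnd ps (p+1) - (p+1)) '.')
            = (ps.zipIdx (j0+1)).foldl
            (fun (out : List Char) pj => out.set (pj.1 - (p+1)) (pvL number k pj.2))
            (List.replicate (pvEnd ps (p+1) - (p+1)) '.') := by
          apply PySem.List.foldl_congr_mem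
          intro out x hx
          have hx1 : x.1 ∈ ps := List.fst_mem_of_mem_zipIdx hx
          have := hmem x.1 hx1
          have hlen : (List.replicate (p-h) '.' ++ [pvL number k j0]).length = (p+1) - h := by
            simp; omega
          rw [hlen, show x.1 - h - (p + 1 - h) = x.1 - (p + 1) by omega]
        rw [hinner, ih (j0+1) (p+1) ps htail hps]
        simp [pvSeg, List.append_assoc]

-- the outer 'for i in range((k-1)*2, -1, -2)' list, as an indexed map
theorem pvRangeA (k : Int) (hk : 0 < k) :
    PySem.List.pyRange ((k - 1) * 2) (-1) (-2)
      = (List.range' 0 k.toNat).map (fun (j : Nat) => (k - 1) * 2 - 2 * (j : Int)) := by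
  unfold PySem.List.pyRange
  rw [if_neg (by norm_num), if_neg (by norm_num), if_pos (by omega)]
  rw [show ((k - 1) * 2 - -1 + - -2 - 1) / -(-2) = k by
    rw [show ((k - 1) * 2 - -1 + - -2 - 1) = k * 2 by ring,
      show (-(-2 : Int)) = 2 by norm_num]
    omega]
  rw [← List.range_eq_range' ]
  apply List.map_congr_left
  intro j _
  ring

theorem pvChain_ne_nil (seed : Int) (h n : Nat) (ps : List Nat) (hc : pvChain seed h (n+1) ps) :
    ps ≠ [] := by
  cases hc; simp

-- ===== VERDICT (by name: the statement is the Claim_ definition above) =====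
theorem gapped_convert_to_letters_spec : Claim_equal_gapped_convert_to_letters := by
  intro number k seed seedwidth hdom hpre
  unfold Spec_gapped_convert_to_letters
  unfold gapped_convert_to_letters gapped_convert_to_letters_alt
  dsimp only
  by_cases hk : k ≤ 0
  · -- range is empty, B's length test fails immediately
    rw [show PySem.List.pyRange ((k - 1) * 2) (-1) (-2) = [] by
      unfold PySem.List.pyRange
      rw [if_neg (by norm_num), if_neg (by norm_num), if_neg (by omega)]
      simp]
    rw [show pvPositionsB seed k (k.toNat + 64) 0 [] = [] by
      rw [show k.toNat + 64 = 63 + 1 by omega, pvPositionsB, if_neg (by simp; omega)]]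
    simp
  · rw [not_le] at hk
    have hdom' : -2147483648 ≤ seed ∧ seed ≤ 2147483648 ∧ k ≤ 2147483648 := by
      unfold Dom_gapped_convert_to_letters pvDomInt at hdom
      simp only [Bool.and_eq_true, decide_eq_true_eq] at hdom
      obtain ⟨⟨⟨hnum, hkk⟩, hsd⟩, hsw⟩ := hdom
      exact ⟨hsd.1, hsd.2, hkk.2⟩
    set n := k.toNat with hn
    have hav : seed < 0 ∨ n ≤ ((Finset.range 32).filter (fun q => 0 ≤ q ∧ seed.testBit q = true)).card := by
      rcases hpre with h1 | h2 | h3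
      · omega
      · exact Or.inl h2
      · rcases lt_or_ge seed 0 with hneg | hnn
        · exact Or.inl hneg
        · right
          rw [Finset.filter_congr (fun q _ => by simp : ∀ q ∈ Finset.range 32,
            (0 ≤ q ∧ seed.testBit q = true) ↔ (seed.testBit q = true))]
          rw [← pvSizeFilter seed hnn hdom'.2.1]
          omega
    obtain ⟨ps, hc⟩ := pvChain_exists seed hdom'.1 n 0 hav
    have hne : ps ≠ [] := by
      have hn1 : n = (n - 1) + 1 := by omega
      rw [hn1] at hc
      exact pvChain_ne_nil seed 0 (n-1) ps hc
    -- A's side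
    rw [pvRangeA k hk, ← hn]
    rw [pvFoldA_eq number k seed n 0 0 [] ps hc]
    -- B's side
    rw [pvPositionsB_eq seed k hk (n + 64) n 0 [] ps hc (by simp; omega) (by
      have := pvEnd_le seed n 0 ps hc
      omega)]
    simp only [List.nil_append]
    rw [if_neg hne]
    -- align B's buffer and fill with pvFill_eq at h = 0
    have hbuf : List.replicate (ps.getLast! + 1) '.' = List.replicate (pvEnd ps 0 - 0) '.' := by
      rw [pvEnd_getLast ps hne 0]
      norm_num
    rw [hbuf]
    have hfold : (ps.zipIdx 0).foldl
        (fun (out : List Char) pj =>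
          out.set pj.1
            ((PySem.Str.pyGet? "ACGT"
              (PySem.Int.band (Int.shiftRight number ((k - 1 - (pj.2 : Int)) * 2).toNat) 3)).getD '?'))
        (List.replicate (pvEnd ps 0 - 0) '.')
        = (ps.zipIdx 0).foldl
        (fun (out : List Char) pj => out.set (pj.1 - 0) (pvL number k pj.2))
        (List.replicate (pvEnd ps 0 - 0) '.') := by
      apply PySem.List.foldl_congr_mem
      intro out x _
      rw [Nat.sub_zero]
      rfl
    rw [hfold, pvFill_eq number k seed n 0 0 ps hc hne]
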